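-- pv_equiv track=rewrite | github.com/BalazsFarkas25/FitMySize | Application/app/helpers/evaluation.py | find_border_non_negative_index
-- ===== SOURCE A (Python) =====
-- def find_border_non_negative_index(array, startingFromEnd):
--     if startingFromEnd:
--         for i in range(len(array) - 1, -1, -1):
--             if array[i] != -1:
--                 return i
--         return -1
--     else:
--         for i in range(len(array)):
--             if array[i] != -1:
--                 # mirror values in case of left side
--                 # Make the middle of the body (end of the left side) 0-> index 358 is widht-358-> X relative to middle of body
--                 return len(array)-i
--         return -1
-- ===== SOURCE B (Python) =====
-- def find_border_non_negative_index(array, startingFromEnd):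
--     hits = [i for i, v in enumerate(array) if v != -1]
--     if not hits:
--         return -1
--     return hits[-1] if startingFromEnd else len(array) - hits[0]
-- ===== Notes on version B (the rewrite author's own statement) =====
-- stated objective: simpler
-- what changed: Replaces A's two mirrored early-exit index scans (one forward, one backward) with a single forward pass that collects all non-(-1) indices, then selects the last or the (mirrored) first endpoint.
import Mathlib
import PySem

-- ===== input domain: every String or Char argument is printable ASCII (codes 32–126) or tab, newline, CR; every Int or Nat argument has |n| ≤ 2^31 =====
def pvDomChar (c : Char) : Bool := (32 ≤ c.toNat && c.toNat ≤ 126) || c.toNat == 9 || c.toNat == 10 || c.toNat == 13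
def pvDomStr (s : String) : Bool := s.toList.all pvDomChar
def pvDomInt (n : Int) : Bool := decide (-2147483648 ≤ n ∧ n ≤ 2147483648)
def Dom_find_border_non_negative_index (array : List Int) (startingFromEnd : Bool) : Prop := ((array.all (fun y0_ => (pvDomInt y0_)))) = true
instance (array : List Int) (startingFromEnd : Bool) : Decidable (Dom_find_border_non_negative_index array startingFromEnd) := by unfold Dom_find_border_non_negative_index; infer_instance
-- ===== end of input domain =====

-- B replaces A's two mirrored early-exit index scans with one pass collecting the non-(-1) indices and an endpoint selection (objective: simpler).

-- ===== PORT A =====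
-- body of A's backward for-loop (early exit modelled by recursion over the remaining range);
-- indices come from range(len(array)-1, -1, -1), so array[i] is always in bounds and pyGetD's default is never used
def pvLoopBack (array : List Int) : List Int → Int
  | [] => -1
  | i :: rest => if PySem.List.pyGetD array i 0 ≠ -1 then i else pvLoopBack array rest

-- body of A's forward for-loop; indices come from range(len(array)), always in bounds
def pvLoopFront (array : List Int) : List Int → Int
  | [] => -1
  | i :: rest => if PySem.List.pyGetD array i 0 ≠ -1 then (array.length : Int) - i else pvLoopFront array rest

def find_border_non_negative_index (array : List Int) (startingFromEnd : Bool) : Int :=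
  if startingFromEnd then
    pvLoopBack array (PySem.List.pyRange ((array.length : Int) - 1) (-1) (-1))
  else
    pvLoopFront array (PySem.List.pyRange 0 (array.length : Int) 1)

-- ===== PORT B =====
def find_border_non_negative_index_alt (array : List Int) (startingFromEnd : Bool) : Int :=
  let hits := ((PySem.List.enumerate array 0).filter (fun p => p.2 != -1)).map (fun p => p.1)
  match hits with
  | [] => -1
  | h :: t => if startingFromEnd then (h :: t).getLast (by simp) else (array.length : Int) - h

-- ===== PRECONDITION & SPEC =====
def Spec_find_border_non_negative_index (array : List Int) (startingFromEnd : Bool) (out : Int) : Prop := out = find_border_non_negative_index_alt array startingFromEnd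
instance (array : List Int) (startingFromEnd : Bool) (out : Int) : Decidable (Spec_find_border_non_negative_index array startingFromEnd out) := by unfold Spec_find_border_non_negative_index; infer_instance

-- ===== CLAIM (what is proved, stated in full; the proofs are below) =====
def Claim_equal_find_border_non_negative_index : Prop := ∀ (array : List Int) (startingFromEnd : Bool), Dom_find_border_non_negative_index array startingFromEnd → Spec_find_border_non_negative_index array startingFromEnd (find_border_non_negative_index array startingFromEnd)

-- ===== LEMMAS AND PROOFS =====

-- structural characterisations of A's two scans
def pvAf : List Int → Int
  | [] => -1
  | x :: xs => if x ≠ -1 then (xs.length : Int) + 1 else pvAf xs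

def pvAb : List Int → Int
  | [] => -1
  | x :: xs => if pvAb xs = -1 then (if x ≠ -1 then 0 else -1) else pvAb xs + 1

def pvHits (xs : List Int) : List Int :=
  ((PySem.List.enumerate xs 0).filter (fun p => p.2 != -1)).map (fun p => p.1)

theorem pvEnumerate_shift (xs : List Int) (s : Int) :
    PySem.List.enumerate xs (s + 1) = (PySem.List.enumerate xs s).map (fun p => (p.1 + 1, p.2)) := by
  induction xs generalizing s with
  | nil => simp [PySem.List.enumerate_nil]
  | cons x xs ih =>
    simp [PySem.List.enumerate_cons, ih (s + 1)]

theorem pvHits_cons (x : Int) (xs : List Int) :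
    pvHits (x :: xs) = (if x ≠ -1 then [(0 : Int)] else []) ++ (pvHits xs).map (· + 1) := by
  unfold pvHits
  rw [PySem.List.enumerate_cons]
  have h1 : (0 : Int) + 1 = 1 := by ring
  rw [show (0 : Int) + 1 = 0 + 1 from rfl, pvEnumerate_shift xs 0]
  by_cases hx : x = -1 <;>
    simp [hx, List.filter_map, List.map_map, Function.comp_def]

theorem pvLoopBack_append (array : List Int) (l1 l2 : List Int)
    (h : ∀ i ∈ l1, 0 ≤ i) :
    pvLoopBack array (l1 ++ l2) =
      if pvLoopBack array l1 = -1 then pvLoopBack array l2 else pvLoopBack array l1 := by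
  induction l1 with
  | nil => simp [pvLoopBack]
  | cons i rest ih =>
    simp only [List.cons_append, pvLoopBack]
    by_cases hv : PySem.List.pyGetD array i 0 ≠ -1
    · have hi0 : (0:Int) ≤ i := h i (by simp)
      rw [if_pos hv, if_pos hv, if_neg (by omega)]
    · rw [if_neg hv, if_neg hv]
      exact ih (fun j hj => h j (by simp [hj]))

theorem pvLoopBack_cons_shift (x : Int) (xs : List Int) (ixs : List Int)
    (h : ∀ i ∈ ixs, 1 ≤ i) :
    pvLoopBack (x :: xs) ixs =
      if pvLoopBack xs (ixs.map (· - 1)) = -1 then -1 else pvLoopBack xs (ixs.map (· - 1)) + 1 := by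
  induction ixs with
  | nil => simp [pvLoopBack]
  | cons i rest ih =>
    have hi : 1 ≤ i := h i (by simp)
    have hget : PySem.List.pyGetD (x :: xs) i 0 = PySem.List.pyGetD xs (i - 1) 0 := by
      rw [PySem.List.pyGetD_of_nonneg (x :: xs) 0 (by omega)]
      rw [PySem.List.pyGetD_of_nonneg xs 0 (show (0:Int) ≤ i - 1 by omega)]
      have : i.toNat = (i - 1).toNat + 1 := by omega
      rw [this]
      simp [List.getD]
    simp only [List.map_cons, pvLoopBack, hget]
    by_cases hv : PySem.List.pyGetD xs (i - 1) 0 ≠ -1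
    · simp only [if_pos hv]
      rw [if_neg (show ¬(i - 1 = -1) by omega)]
      omega
    · simp only [if_neg hv]
      exact ih (fun j hj => h j (by simp [hj]))

theorem pvLoopFront_cons_shift (x : Int) (xs : List Int) (ixs : List Int)
    (h : ∀ i ∈ ixs, 1 ≤ i) :
    pvLoopFront (x :: xs) ixs = pvLoopFront xs (ixs.map (· - 1)) := by
  induction ixs with
  | nil => simp [pvLoopFront]
  | cons i rest ih =>
    have hi : 1 ≤ i := h i (by simp)
    have hget : PySem.List.pyGetD (x :: xs) i 0 = PySem.List.pyGetD xs (i - 1) 0 := by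
      rw [PySem.List.pyGetD_of_nonneg (x :: xs) 0 (by omega)]
      rw [PySem.List.pyGetD_of_nonneg xs 0 (show (0:Int) ≤ i - 1 by omega)]
      have : i.toNat = (i - 1).toNat + 1 := by omega
      rw [this]
      simp [List.getD]
    simp only [List.map_cons, pvLoopFront, hget]
    by_cases hv : PySem.List.pyGetD xs (i - 1) 0 ≠ -1
    · simp only [if_pos hv]
      simp
      omega
    · simp only [if_neg hv]
      exact ih (fun j hj => h j (by simp [hj]))

theorem pvRange_map_sub_one (a b : Int) :
    (PySem.List.pyRange a b 1).map (· - 1) = PySem.List.pyRange (a - 1) (b - 1) 1 := by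
  rw [PySem.List.pyRange_one, PySem.List.pyRange_one, List.map_map]
  have : b - 1 - (a - 1) = b - a := by ring
  rw [this]
  apply List.map_congr_left
  intro k _
  simp
  ring

theorem pvRange_neg_map_sub_one (a b : Int) :
    (PySem.List.pyRange a b (-1)).map (· - 1) = PySem.List.pyRange (a - 1) (b - 1) (-1) := by
  rw [PySem.List.pyRange_neg_one, PySem.List.pyRange_neg_one, List.map_map]
  have : a - 1 - (b - 1) = a - b := by ring
  rw [this]
  apply List.map_congr_left
  intro k _
  simp
  ring

theorem pvLoopFront_eq_pvAf (array : List Int) :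
    pvLoopFront array (PySem.List.pyRange 0 (array.length : Int) 1) = pvAf array := by
  induction array with
  | nil =>
    rw [show (([] : List Int).length : Int) = 0 by simp, PySem.List.pyRange_one_eq_nil (by omega)]
    simp [pvLoopFront, pvAf]
  | cons x xs ih =>
    have hlen : ((x :: xs).length : Int) = (xs.length : Int) + 1 := by simp
    rw [hlen, PySem.List.pyRange_one_cons (by omega)]
    simp only [pvLoopFront, PySem.List.pyGetD_zero_cons]
    by_cases hx : x = -1
    · rw [if_neg (by simp [hx])]
      rw [pvLoopFront_cons_shift x xs (PySem.List.pyRange (0 + 1) ((xs.length : Int) + 1) 1) (by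
        intro i hi
        rw [PySem.List.mem_pyRange_one] at hi
        omega)]
      rw [pvRange_map_sub_one]
      have h01 : (0 : Int) + 1 - 1 = 0 := by ring
      have h02 : (xs.length : Int) + 1 - 1 = (xs.length : Int) := by ring
      rw [h01, h02, ih]
      simp [pvAf, hx]
    · rw [if_pos hx]
      simp [pvAf, hx]

theorem pvAb_nonneg (xs : List Int) (h : pvAb xs ≠ -1) : 0 ≤ pvAb xs := by
  induction xs with
  | nil => simp [pvAb] at h
  | cons x xs ih =>
    simp only [pvAb] at h ⊢
    by_cases hr : pvAb xs = -1
    · rw [if_pos hr] at h ⊢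
      split_ifs at h ⊢ <;> omega
    · rw [if_neg hr] at h ⊢
      have := ih hr
      omega

theorem pvLoopBack_eq_pvAb (array : List Int) :
    pvLoopBack array (PySem.List.pyRange ((array.length : Int) - 1) (-1) (-1)) = pvAb array := by
  induction array with
  | nil => simp [PySem.List.pyRange_neg_one_eq_nil, pvLoopBack, pvAb]
  | cons x xs ih =>
    have hlen : ((x :: xs).length : Int) = (xs.length : Int) + 1 := by simp
    rw [hlen]
    have hsplit : PySem.List.pyRange ((xs.length : Int) + 1 - 1) (-1) (-1) =
        PySem.List.pyRange (xs.length : Int) 0 (-1) ++ PySem.List.pyRange 0 (-1) (-1) := by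
      rw [PySem.List.pyRange_neg_one_eq_reverse, PySem.List.pyRange_neg_one_eq_reverse,
          PySem.List.pyRange_neg_one_eq_reverse]
      have h1 : (xs.length : Int) + 1 - 1 + 1 = (xs.length : Int) + 1 := by ring
      have h2 : (-1 : Int) + 1 = 0 := by ring
      have h3 : (0 : Int) + 1 = 1 := by ring
      rw [h1, h2, h3, ← List.reverse_append]
      rw [← PySem.List.pyRange_one_append 0 1 ((xs.length : Int) + 1) (by omega) (by omega)]
    rw [hsplit]
    rw [pvLoopBack_append _ _ _ (by
      intro i hi
      rw [PySem.List.mem_pyRange_neg_one] at hi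
      omega)]
    rw [pvLoopBack_cons_shift x xs _ (by
      intro i hi
      rw [PySem.List.mem_pyRange_neg_one] at hi
      omega)]
    rw [pvRange_neg_map_sub_one]
    have h5 : (0 : Int) - 1 = -1 := by ring
    rw [h5, ih]
    have hzero : PySem.List.pyRange 0 (-1) (-1) = [0] := by decide
    rw [hzero]
    by_cases hr : pvAb xs = -1
    · rw [if_pos (by rw [if_pos hr])]
      simp [pvLoopBack, pvAb, PySem.List.pyGetD_zero_cons, hr]
    · have h0 : (0 : Int) ≤ pvAb xs := pvAb_nonneg xs hr
      rw [if_neg (by rw [if_neg hr]; omega), if_neg hr]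
      simp [pvAb, hr]

theorem pvHits_nonneg (array : List Int) : ∀ i ∈ pvHits array, 0 ≤ i := by
  induction array with
  | nil => simp [pvHits, PySem.List.enumerate_nil]
  | cons x xs ih =>
    rw [pvHits_cons]
    intro i hi
    rw [List.mem_append] at hi
    rcases hi with hi | hi
    · split_ifs at hi <;> simp_all
    · rw [List.mem_map] at hi
      obtain ⟨j, hj, rfl⟩ := hi
      have := ih j hj
      omega

theorem pvAlt_front (array : List Int) :
    (match pvHits array with
     | [] => (-1 : Int)
     | h :: _ => (array.length : Int) - h) = pvAf array := by
  induction array with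
  | nil => simp [pvHits, PySem.List.enumerate_nil, pvAf]
  | cons x xs ih =>
    rw [pvHits_cons]
    by_cases hx : x = -1
    · rw [if_neg (by simp [hx]), List.nil_append]
      rw [show pvAf (x :: xs) = pvAf xs by simp [pvAf, hx]]
      rw [← ih]
      cases hh : pvHits xs with
      | nil => simp
      | cons h t =>
        show ((x :: xs).length : Int) - (h + 1) = (xs.length : Int) - h
        simp only [List.length_cons]
        push_cast
        omega
    · rw [if_pos hx, List.cons_append]
      simp [pvAf, hx]

theorem pvAlt_back' (array : List Int) :
    (pvHits array).getLast?.getD (-1) = pvAb array := by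
  induction array with
  | nil => simp [pvHits, PySem.List.enumerate_nil, pvAb]
  | cons x xs ih =>
    rw [pvHits_cons]
    by_cases hx : x = -1
    · rw [if_neg (by simp [hx]), List.nil_append, List.getLast?_map]
      cases hgl : (pvHits xs).getLast? with
      | none =>
        have hab : pvAb xs = -1 := by rw [← ih, hgl]; rfl
        simp [pvAb, hab, hx]
      | some v =>
        have hv0 : (0 : Int) ≤ v := pvHits_nonneg xs v (List.mem_of_getLast? hgl)
        have hab : pvAb xs = v := by rw [← ih, hgl]; rfl
        simp only [pvAb, hab, Option.map_some, Option.getD_some]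
        rw [if_neg (by omega)]
    · rw [if_pos hx, List.cons_append, List.nil_append, List.getLast?_cons]
      cases hgl : (pvHits xs).getLast? with
      | none =>
        have hnil : pvHits xs = [] := List.getLast?_eq_none_iff.mp hgl
        have hab : pvAb xs = -1 := by rw [← ih, hgl]; rfl
        simp [hnil, pvAb, hab, hx]
      | some v =>
        have hv0 : (0 : Int) ≤ v := pvHits_nonneg xs v (List.mem_of_getLast? hgl)
        have hab : pvAb xs = v := by rw [← ih, hgl]; rfl
        have hmap : ((pvHits xs).map (· + 1)).getLast? = some (v + 1) := by
          rw [List.getLast?_map, hgl]; rfl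
        rw [hmap]
        simp only [Option.getD_some, pvAb, hab]
        rw [if_neg (by omega)]

-- ===== VERDICT (by name: the statement is the Claim_ definition above) =====
theorem find_border_non_negative_index_spec : Claim_equal_find_border_non_negative_index := by
  intro array startingFromEnd _
  unfold Spec_find_border_non_negative_index find_border_non_negative_index find_border_non_negative_index_alt
  cases startingFromEnd with
  | true =>
    rw [show (if true = true then pvLoopBack array (PySem.List.pyRange ((array.length : Int) - 1) (-1) (-1)) else pvLoopFront array (PySem.List.pyRange 0 (array.length : Int) 1)) = pvLoopBack array (PySem.List.pyRange ((array.length : Int) - 1) (-1) (-1)) from rfl]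
    rw [pvLoopBack_eq_pvAb, ← pvAlt_back' array]
    show ((pvHits array).getLast?.getD (-1) =
      match pvHits array with
      | [] => (-1 : Int)
      | h :: t => (h :: t).getLast (by simp))
    cases hh : pvHits array with
    | nil => rfl
    | cons h t =>
      simp only [List.getLast?_eq_some_getLast (l := h :: t) (by simp), Option.getD_some]
  | false =>
    simp only [Bool.false_eq_true, if_false]
    rw [pvLoopFront_eq_pvAf, ← pvAlt_front array]
    rfl
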